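-- pv_equiv track=rewrite | github.com/kevinsogo/compgen | kg/__init__.py | construct_subs_files
-- ===== SOURCE A (Python) =====
-- def construct_subs_files(subtasks_of, inputs):
--     prev, lf, rg = None, 0, -1
--     for idx, file in enumerate(inputs):
--         assert rg == idx - 1
--         subs = subtasks_of[file]
--         assert subs
--         if prev != subs:
--             if prev: yield lf, rg, list(sorted(map(int, prev)))
--             prev, lf = subs, idx
--         rg = idx
--     if prev: yield lf, rg, list(sorted(map(int, prev)))
-- ===== SOURCE B (Python) =====
-- def construct_subs_files(subtasks_of, inputs):
--     keys = [subtasks_of[f] for f in inputs]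
--     i = 0
--     while i < len(keys):
--         k = keys[i]
--         assert k
--         j = i + 1
--         while j < len(keys) and keys[j] == k:
--             j += 1
--         yield i, j - 1, sorted(map(int, k))
--         i = j
-- ===== Notes on version B (the rewrite author's own statement) =====
-- stated objective: alternative
-- what changed: Replaces A's prev/lf/rg state machine with flush-on-change by a precomputed key list scanned by a two-pointer run finder that emits each run directly.
import Mathlib
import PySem

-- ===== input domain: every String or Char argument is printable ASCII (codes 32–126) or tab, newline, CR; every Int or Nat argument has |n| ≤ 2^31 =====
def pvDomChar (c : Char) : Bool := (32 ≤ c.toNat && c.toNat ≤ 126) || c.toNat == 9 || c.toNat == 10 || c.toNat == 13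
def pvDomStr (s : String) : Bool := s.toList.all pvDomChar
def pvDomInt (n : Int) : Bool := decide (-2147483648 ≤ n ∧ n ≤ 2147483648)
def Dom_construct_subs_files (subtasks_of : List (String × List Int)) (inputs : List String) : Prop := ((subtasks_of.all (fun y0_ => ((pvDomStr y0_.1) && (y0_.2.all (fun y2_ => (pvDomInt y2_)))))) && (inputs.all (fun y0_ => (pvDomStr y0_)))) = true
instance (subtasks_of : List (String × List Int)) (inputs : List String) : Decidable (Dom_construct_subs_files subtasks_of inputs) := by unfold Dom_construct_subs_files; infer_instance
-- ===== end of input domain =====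

-- B replaces A's prev/lf/rg flush-on-change state machine by a two-pointer run scanner
-- over a precomputed key list (alternative decomposition; return-value equivalence of the listed generators).


-- ===== PORT A =====
-- 'if prev: yield lf, rg, list(sorted(map(int, prev)))' — prev is None or a list; truthy = some nonempty list
def pyFlushA (prev : Option (List Int)) (lf rg : Int) : List (Int × Int × List Int) :=
  match prev with
  | none => []
  | some p => if p = [] then [] else [(lf, rg, PySem.List.sorted p (fun x => x) false)]

-- the 'for idx, file in enumerate(inputs)' loop, carrying (prev, lf, rg, yielded-so-far);
-- 'assert rg == idx - 1' holds by construction (rg is always set to the previous idx), so it never fires;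
-- a missing key (KeyError) or empty subs (AssertionError) raises in Python — outside Pre_, the port stops with the items yielded so far
def goA (subtasks_of : List (String × List Int)) :
    List String → Int → Option (List Int) → Int → Int → List (Int × Int × List Int) → List (Int × Int × List Int)
  | [], _, prev, lf, rg, acc => acc ++ pyFlushA prev lf rg
  | file :: rest, idx, prev, lf, _, acc =>
    match subtasks_of.lookup file with
    | none => acc
    | some subs =>
      if subs = [] then acc
      else if prev ≠ some subs then
        goA subtasks_of rest (idx + 1) (some subs) idx idx (acc ++ pyFlushA prev lf (idx - 1))
      else
        goA subtasks_of rest (idx + 1) prev lf idx acc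

def construct_subs_files (subtasks_of : List (String × List Int)) (inputs : List String) : List (Int × Int × List Int) :=
  goA subtasks_of inputs 0 none 0 (-1) []

-- ===== PORT B =====
-- length of the prefix of ks equal to k ('while j < len(keys) and keys[j] == k: j += 1')
def runLen (k : List Int) : List (List Int) → Nat
  | [] => 0
  | x :: xs => if x = k then runLen k xs + 1 else 0

-- the outer while loop of Source B: emit one run, jump past it ('assert k' raises on an empty key — outside Pre_)
def goB : Int → List (List Int) → List (Int × Int × List Int)
  | _, [] => []
  | i, k :: rest =>
    if k = [] then []
    else
      let c := runLen k rest
      (i, i + (c : Int), PySem.List.sorted k (fun x => x) false) :: goB (i + 1 + (c : Int)) (rest.drop c)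
  termination_by _ ks => ks.length
  decreasing_by simp

def construct_subs_files_alt (subtasks_of : List (String × List Int)) (inputs : List String) : List (Int × Int × List Int) :=
  goB 0 (inputs.map (fun f => ((subtasks_of.lookup f).getD [])))

-- ===== PRECONDITION & SPEC =====
-- Pre_ = exactly where Python A returns: every input file is a key of subtasks_of with a nonempty subtask list
-- (otherwise A raises KeyError resp. AssertionError)
def Pre_construct_subs_files (subtasks_of : List (String × List Int)) (inputs : List String) : Prop :=
  ∀ f ∈ inputs, ((subtasks_of.lookup f).getD []) ≠ []
instance (subtasks_of : List (String × List Int)) (inputs : List String) : Decidable (Pre_construct_subs_files subtasks_of inputs) := by unfold Pre_construct_subs_files; infer_instance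

def pvWitness_construct_subs_files : (List (String × List Int)) × List String :=
  ([("a", [2, 1]), ("b", [1])], ["a", "a", "b"])

def Spec_construct_subs_files (subtasks_of : List (String × List Int)) (inputs : List String) (out : List (Int × Int × List Int)) : Prop := out = construct_subs_files_alt subtasks_of inputs
instance (subtasks_of : List (String × List Int)) (inputs : List String) (out : List (Int × Int × List Int)) : Decidable (Spec_construct_subs_files subtasks_of inputs out) := by unfold Spec_construct_subs_files; infer_instance

-- ===== CLAIM (what is proved, stated in full; the proofs are below) =====
def Claim_equal_construct_subs_files : Prop := ∀ (subtasks_of : List (String × List Int)) (inputs : List String), Dom_construct_subs_files subtasks_of inputs → Pre_construct_subs_files subtasks_of inputs → Spec_construct_subs_files subtasks_of inputs (construct_subs_files subtasks_of inputs)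

-- ===== LEMMAS AND PROOFS =====

-- unfolding equations for the well-founded goB
theorem goB_nil (i : Int) : goB i [] = [] := by rw [goB]

theorem goB_cons (i : Int) (k : List Int) (rest : List (List Int)) (hk : k ≠ []) :
    goB i (k :: rest) =
      (i, i + (runLen k rest : Int), PySem.List.sorted k (fun x => x) false)
        :: goB (i + 1 + (runLen k rest : Int)) (rest.drop (runLen k rest)) := by
  rw [goB]; simp [hk]

-- run invariant: once A's state is (some p, lf, rg = i-1), the rest of the fold produces
-- the pending run (lf, i-1+run, sorted p) followed by B's scan of the remaining keys
theorem goA_run (so : List (String × List Int)) :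
    ∀ (inputs : List String) (i lf : Int) (p : List Int) (acc : List (Int × Int × List Int)),
      (∀ f ∈ inputs, ((so.lookup f).getD []) ≠ []) → p ≠ [] →
      goA so inputs i (some p) lf (i - 1) acc =
        acc ++ (lf, i - 1 + (runLen p (inputs.map (fun f => ((so.lookup f).getD []))) : Int),
                PySem.List.sorted p (fun x => x) false)
            :: goB (i + (runLen p (inputs.map (fun f => ((so.lookup f).getD []))) : Int))
                ((inputs.map (fun f => ((so.lookup f).getD []))).drop
                  (runLen p (inputs.map (fun f => ((so.lookup f).getD []))))) := by
  intro inputs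
  induction inputs with
  | nil =>
    intro i lf p acc _ hp
    simp [goA, pyFlushA, runLen, goB_nil, hp]
  | cons f rest ih =>
    intro i lf p acc hpre hp
    have hf := hpre f (by simp)
    obtain ⟨subs, hlk⟩ : ∃ subs, so.lookup f = some subs := by
      cases h : so.lookup f with
      | none => simp [h] at hf
      | some v => exact ⟨v, rfl⟩
    have hsubs : subs ≠ [] := by simpa [hlk] using hf
    have hrest : ∀ g ∈ rest, ((so.lookup g).getD []) ≠ [] := fun g hg => hpre g (by simp [hg])
    by_cases hpe : p = subs
    · subst hpe
      have h1 : goA so (f :: rest) i (some p) lf (i - 1) acc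
          = goA so rest (i + 1) (some p) lf i acc := by
        simp [goA, hlk, hsubs]
      have h2 := ih (i + 1) lf p acc hrest hp
      rw [show i + 1 - 1 = i by ring] at h2
      rw [h1, h2]
      simp only [List.map_cons, hlk, Option.getD_some, runLen]
      push_cast
      ring_nf
      simp only [Nat.add_comm 1, List.drop_succ_cons]
    · have h1 : goA so (f :: rest) i (some p) lf (i - 1) acc
          = goA so rest (i + 1) (some subs) i i (acc ++ pyFlushA (some p) lf (i - 1)) := by
        simp [goA, hlk, hsubs, hpe]
      have h2 := ih (i + 1) i subs (acc ++ pyFlushA (some p) lf (i - 1)) hrest hsubs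
      rw [show i + 1 - 1 = i by ring] at h2
      rw [h1, h2]
      have hr0 : runLen p ((f :: rest).map (fun g => ((so.lookup g).getD []))) = 0 := by
        simp only [List.map_cons, hlk, Option.getD_some, runLen]
        rw [if_neg (fun h => hpe h.symm)]
      rw [hr0]
      simp only [List.map_cons, hlk, Option.getD_some, Nat.cast_zero, add_zero, List.drop_zero]
      rw [goB_cons i subs _ hsubs]
      simp [pyFlushA, hp]

-- ===== VERDICT (by name: the statement is the Claim_ definition above) =====
theorem construct_subs_files_spec : Claim_equal_construct_subs_files := by
  intro so inputs _ hpre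
  unfold Spec_construct_subs_files construct_subs_files construct_subs_files_alt
  cases inputs with
  | nil => simp [goA, pyFlushA, goB_nil]
  | cons f rest =>
    have hf := hpre f (by simp)
    obtain ⟨subs, hlk⟩ : ∃ subs, so.lookup f = some subs := by
      cases h : so.lookup f with
      | none => simp [h] at hf
      | some v => exact ⟨v, rfl⟩
    have hsubs : subs ≠ [] := by simpa [hlk] using hf
    have hrest : ∀ g ∈ rest, ((so.lookup g).getD []) ≠ [] := fun g hg => hpre g (by simp [hg])
    have h1 : goA so (f :: rest) 0 none 0 (-1) []
        = goA so rest 1 (some subs) 0 0 [] := by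
      simp [goA, hlk, hsubs, pyFlushA]
    have h2 := goA_run so rest 1 0 subs [] hrest hsubs
    norm_num at h2
    rw [h1, h2]
    simp only [List.map_cons, hlk, Option.getD_some]
    rw [goB_cons 0 subs _ hsubs]
    push_cast
    ring_nf
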